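-- pv_equiv track=rewrite | github.com/datagrains/bionumerics_trace | common/block_utils.py | parse_blocks
-- ===== SOURCE A (Python) =====
-- from typing import List
--
-- def parse_blocks(text: str) -> List[str]:
--     """
--     Parses the input text into valid ABI trace blocks based on known start and end delimiters.
--
--     Each block is expected to begin with a line starting '-1    NULL    CTG' and typically ends with '</Tracefile>'.
--     Only blocks containing 'Tracefile' or '<FileName>' are retained.
--
--     Args:
--         text (str): The full text content to parse.
--
--     Returns:
--         list[str]: A list of strings, each representing a parsed block.
--     """
--     blocks, current = [], []
--     for line in text.splitlines():
--         if line.startswith("-1\tNULL\tCTG"):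
--             if current and any("Tracefile" in l or "<FileName>" in l for l in current):
--                 blocks.append("\n".join(current))
--             current = [line]
--         elif "</Tracefile>" in line:
--             current.append(line)
--             blocks.append("\n".join(current))
--             current = []
--         else:
--             current.append(line)
--
--     # Only append the last block if it contains valid trace content
--     if current and any("Tracefile" in l or "<FileName>" in l for l in current):
--         blocks.append("\n".join(current))
--
--     return blocks
-- ===== SOURCE B (Python) =====
-- from typing import List
--
-- _START = "-1\tNULL\tCTG"
-- _CLOSE = "</Tracefile>"
--
--
-- def _valid(seg: List[str]) -> bool:
--     return any("Tracefile" in l or "<FileName>" in l for l in seg)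
--
--
-- def parse_blocks(text: str) -> List[str]:
--     # Pass 1: compute the cut positions between candidate blocks.
--     lines = text.splitlines()
--     cuts = [0]
--     for i, line in enumerate(lines):
--         if line.startswith(_START):
--             cuts.append(i)
--         elif _CLOSE in line:
--             cuts.append(i + 1)
--     cuts.append(len(lines))
--     # Pass 2: slice the line list at the cuts into candidate segments.
--     segs = [lines[a:b] for a, b in zip(cuts, cuts[1:])]
--     # Pass 3: keep the valid segments, joined.
--     return ["\n".join(s) for s in segs if _valid(s)]
-- ===== Notes on version B (the rewrite author's own statement) =====
-- stated objective: alternative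
-- what changed: B replaces A's single accumulator loop (with validity checks interleaved at both emit sites) by three staged passes: collect integer cut positions between blocks, slice the line list at consecutive cuts into candidate segments, then filter-and-join the valid segments.
import Mathlib
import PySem

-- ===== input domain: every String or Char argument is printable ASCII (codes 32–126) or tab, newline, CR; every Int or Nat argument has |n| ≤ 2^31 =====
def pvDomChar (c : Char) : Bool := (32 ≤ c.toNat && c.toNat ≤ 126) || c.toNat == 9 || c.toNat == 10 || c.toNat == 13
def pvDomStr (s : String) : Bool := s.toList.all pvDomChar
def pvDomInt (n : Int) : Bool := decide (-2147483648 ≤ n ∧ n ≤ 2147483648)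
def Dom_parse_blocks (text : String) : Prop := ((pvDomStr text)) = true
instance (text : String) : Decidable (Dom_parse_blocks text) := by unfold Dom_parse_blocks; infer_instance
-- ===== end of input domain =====

-- B replaces A's single accumulator loop (validity checks interleaved at both emit sites) by
-- three passes: collect integer cut positions, slice the line list at the cuts, then
-- filter-and-join the valid segments (objective: simpler/alternative; same O(n) cost).

-- ===== PORT A =====
-- '"Tracefile" in l or "<FileName>" in l'
def pvLineValid (l : String) : Bool :=
  PySem.Str.isIn "Tracefile" l || PySem.Str.isIn "<FileName>" l

-- one iteration of A's for-loop over (blocks, current)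
def pvStepA (s : List String × List String) (line : String) : List String × List String :=
  if PySem.Str.startswith line "-1\tNULL\tCTG" then
    if !s.2.isEmpty && s.2.any pvLineValid then
      (s.1 ++ [PySem.Str.join "\n" s.2], [line])
    else
      (s.1, [line])
  else if PySem.Str.isIn "</Tracefile>" line then
    (s.1 ++ [PySem.Str.join "\n" (s.2 ++ [line])], [])
  else
    (s.1, s.2 ++ [line])

def parse_blocks (text : String) : List String :=
  let st := (PySem.Str.splitlines text).foldl pvStepA ([], [])
  if !st.2.isEmpty && st.2.any pvLineValid then st.1 ++ [PySem.Str.join "\n" st.2]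
  else st.1

-- ===== PORT B =====
-- B's _valid helper on a whole segment
def pvBlockValid (b : List String) : Bool := b.any pvLineValid

def parse_blocks_alt (text : String) : List String :=
  let lines := PySem.Str.splitlines text
  -- Pass 1: cut positions (Python ints) between candidate blocks
  let cuts := ((PySem.List.enumerate lines 0).foldl
      (fun (acc : List Int) (p : Int × String) =>
        if PySem.Str.startswith p.2 "-1\tNULL\tCTG" then acc ++ [p.1]
        else if PySem.Str.isIn "</Tracefile>" p.2 then acc ++ [p.1 + 1]
        else acc) [(0 : Int)]) ++ [(lines.length : Int)]
  -- Pass 2: slice lines at consecutive cuts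
  let segs := (cuts.zip cuts.tail).map (fun ab => PySem.List.slice lines (some ab.1) (some ab.2))
  -- Pass 3: keep valid segments, joined
  (segs.filter pvBlockValid).map (PySem.Str.join "\n")

-- ===== PRECONDITION & SPEC =====
def Spec_parse_blocks (text : String) (out : List String) : Prop := out = parse_blocks_alt text
instance (text : String) (out : List String) : Decidable (Spec_parse_blocks text out) := by unfold Spec_parse_blocks; infer_instance

-- ===== CLAIM (what is proved, stated in full; the proofs are below) =====
def Claim_equal_parse_blocks : Prop := ∀ (text : String), Dom_parse_blocks text → Spec_parse_blocks text (parse_blocks text)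

-- ===== LEMMAS AND PROOFS =====

-- proof-only intermediate: the candidate blocks, recursively
def pvBlocksRec : List String → List String → List (List String)
  | cur, [] => [cur]
  | cur, l :: ls =>
    if PySem.Str.startswith l "-1\tNULL\tCTG" then cur :: pvBlocksRec [l] ls
    else if PySem.Str.isIn "</Tracefile>" l then (cur ++ [l]) :: pvBlocksRec [] ls
    else pvBlocksRec (cur ++ [l]) ls

-- proof-only intermediate: the cut positions contributed from index j on
def pvCutsFrom : Nat → List String → List Int
  | _, [] => []
  | j, l :: ls =>
    (if PySem.Str.startswith l "-1\tNULL\tCTG" then [(j : Int)]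
     else if PySem.Str.isIn "</Tracefile>" l then [(j : Int) + 1]
     else []) ++ pvCutsFrom (j + 1) ls

def pvSegsOf (full : List String) (cs : List Int) : List (List String) :=
  (cs.zip cs.tail).map (fun ab => PySem.List.slice full (some ab.1) (some ab.2))

lemma pvSegsOf_cons (full : List String) (a b : Int) (t : List Int) :
    pvSegsOf full (a :: b :: t)
      = PySem.List.slice full (some a) (some b) :: pvSegsOf full (b :: t) := by
  simp [pvSegsOf]

-- A's emptiness-and-validity test collapses to the block-validity test
lemma pvCondA (c : List String) : (!c.isEmpty && c.any pvLineValid) = pvBlockValid c := by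
  cases c <;> simp [pvBlockValid]

-- a line containing "</Tracefile>" is itself valid
lemma pvClose_valid (l : String) (h : PySem.Str.isIn "</Tracefile>" l = true) :
    pvLineValid l = true := by
  have h' : PySem.Chars.isIn "</Tracefile>".toList l.toList = true := by simpa using h
  have hi : ("</Tracefile>".toList : List Char) <:+: l.toList :=
    (PySem.Chars.isIn_iff_infix _ _).mp h'
  have ht : ("Tracefile".toList : List Char) <:+: "</Tracefile>".toList := by decide
  have : PySem.Chars.isIn "Tracefile".toList l.toList = true :=
    (PySem.Chars.isIn_iff_infix _ _).mpr (ht.trans hi)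
  simp [pvLineValid]
  left
  simpa using this

-- A's loop computes the filter-map image of pvBlocksRec
lemma pvLoopA (lines : List String) :
    ∀ (ab : List String) (bb : List (List String)) (cur : List String),
    ab = (bb.filter pvBlockValid).map (PySem.Str.join "\n") →
    (let sa := lines.foldl pvStepA (ab, cur)
     if !sa.2.isEmpty && sa.2.any pvLineValid then sa.1 ++ [PySem.Str.join "\n" sa.2] else sa.1)
    = ((bb ++ pvBlocksRec cur lines).filter pvBlockValid).map (PySem.Str.join "\n") := by
  induction lines with
  | nil =>
    intro ab bb cur hab
    simp only [List.foldl_nil, pvCondA, pvBlocksRec]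
    rw [List.filter_append, List.map_append, hab]
    by_cases h : pvBlockValid cur = true
    · rw [if_pos h]; simp [h]
    · rw [if_neg h]; simp [h]
  | cons line rest ih =>
    intro ab bb cur hab
    simp only [List.foldl_cons]
    by_cases h1 : PySem.Str.startswith line "-1\tNULL\tCTG" = true
    · have hA : pvStepA (ab, cur) line =
          (if !cur.isEmpty && cur.any pvLineValid then (ab ++ [PySem.Str.join "\n" cur], [line])
           else (ab, [line])) := by
        simp only [pvStepA]; rw [if_pos h1]
      have hR : pvBlocksRec cur (line :: rest) = cur :: pvBlocksRec [line] rest := by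
        simp only [pvBlocksRec]; rw [if_pos h1]
      rw [hA, hR, pvCondA cur]
      have hre : bb ++ cur :: pvBlocksRec [line] rest
          = (bb ++ [cur]) ++ pvBlocksRec [line] rest := by simp
      rw [hre]
      by_cases h2 : pvBlockValid cur = true
      · rw [if_pos h2]
        exact ih _ _ _ (by rw [List.filter_append, List.map_append, hab]; simp [h2])
      · rw [if_neg h2]
        exact ih _ _ _ (by rw [List.filter_append, List.map_append, hab]; simp [h2])
    · by_cases h3 : PySem.Str.isIn "</Tracefile>" line = true
      · have hA : pvStepA (ab, cur) line =
            (ab ++ [PySem.Str.join "\n" (cur ++ [line])], []) := by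
          simp only [pvStepA]; rw [if_neg h1, if_pos h3]
        have hR : pvBlocksRec cur (line :: rest) = (cur ++ [line]) :: pvBlocksRec [] rest := by
          simp only [pvBlocksRec]; rw [if_neg h1, if_pos h3]
        have hv : pvBlockValid (cur ++ [line]) = true := by
          simp [pvBlockValid]; right; exact pvClose_valid line h3
        rw [hA, hR]
        have hre : bb ++ (cur ++ [line]) :: pvBlocksRec [] rest
            = (bb ++ [cur ++ [line]]) ++ pvBlocksRec [] rest := by simp
        rw [hre]
        exact ih _ _ _ (by rw [List.filter_append, List.map_append, hab]; simp [hv])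
      · have hA : pvStepA (ab, cur) line = (ab, cur ++ [line]) := by
          simp only [pvStepA]; rw [if_neg h1, if_neg h3]
        have hR : pvBlocksRec cur (line :: rest) = pvBlocksRec (cur ++ [line]) rest := by
          simp only [pvBlocksRec]; rw [if_neg h1, if_neg h3]
        rw [hA, hR]
        exact ih _ _ _ hab

-- B's cut-collecting fold equals pvCutsFrom
lemma pvFoldCuts (lines : List String) :
    ∀ (j : Nat) (acc : List Int),
    (PySem.List.enumerate lines (j : Int)).foldl
      (fun (acc : List Int) (p : Int × String) =>
        if PySem.Str.startswith p.2 "-1\tNULL\tCTG" then acc ++ [p.1]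
        else if PySem.Str.isIn "</Tracefile>" p.2 then acc ++ [p.1 + 1]
        else acc) acc = acc ++ pvCutsFrom j lines := by
  induction lines with
  | nil => intro j acc; simp [PySem.List.enumerate_nil, pvCutsFrom]
  | cons l ls ih =>
    intro j acc
    rw [PySem.List.enumerate_cons, List.foldl_cons]
    have hcast : (j : Int) + 1 = ((j + 1 : Nat) : Int) := by push_cast; ring
    rw [hcast, ih (j + 1)]
    simp only [pvCutsFrom]
    split_ifs <;> simp

-- slicing the line list at the cut positions yields the candidate blocks
lemma pvSegs_eq (rest : List String) :
    ∀ (full : List String) (c j : Nat),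
    c ≤ j → full.drop j = rest →
    pvSegsOf full (((c : Int) :: pvCutsFrom j rest) ++ [(full.length : Int)])
      = pvBlocksRec ((full.drop c).take (j - c)) rest := by
  induction rest with
  | nil =>
    intro full c j hcj hdrop
    have hlen : full.length ≤ j := by
      by_contra h
      have := List.drop_eq_nil_iff.mp hdrop
      omega
    have h1 : (full.drop c).take (j - c) = full.drop c := by
      apply List.take_of_length_le
      simp [List.length_drop]; omega
    have h2 : PySem.List.slice full (some (c : Int)) (some (full.length : Int))
        = full.drop c := by
      rw [PySem.List.slice_natCast]
      apply List.take_of_length_le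
      simp [List.length_drop]
    simp [pvCutsFrom, pvSegsOf, pvBlocksRec, h1, h2]
  | cons l ls ih =>
    intro full c j hcj hdrop
    have hjlt : j < full.length := by
      by_contra h
      have h0 : full.drop j = [] := List.drop_eq_nil_iff.mpr (by omega)
      rw [h0] at hdrop
      simp at hdrop
    have hdrop' : full.drop (j + 1) = ls := by
      have h := congrArg List.tail hdrop
      simpa [List.tail_drop] using h
    have hget : full[j]? = some l := by
      have : (full.drop j)[0]? = some l := by rw [hdrop]; rfl
      simpa [List.getElem?_drop] using this
    -- cur grows by l : (drop c).take (j+1-c) = (drop c).take (j-c) ++ [l]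
    have hgrow : ∀ c' : Nat, c' ≤ j →
        (full.drop c').take (j + 1 - c') = (full.drop c').take (j - c') ++ [l] := by
      intro c' hc'
      have hjc : j + 1 - c' = (j - c') + 1 := by omega
      rw [hjc, List.take_add_one]
      have : (full.drop c')[j - c']? = some l := by
        rw [List.getElem?_drop]
        have : c' + (j - c') = j := by omega
        rw [this, hget]
      simp [this]
    by_cases h1 : PySem.Str.startswith l "-1\tNULL\tCTG" = true
    · have hcuts : pvCutsFrom j (l :: ls) = (j : Int) :: pvCutsFrom (j + 1) ls := by
        simp only [pvCutsFrom]; rw [if_pos h1]; exact List.singleton_append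
      rw [hcuts]; simp only [List.cons_append]; rw [pvSegsOf_cons]
      have hslice : PySem.List.slice full (some (c : Int)) (some (j : Int))
          = (full.drop c).take (j - c) := PySem.List.slice_natCast full c j
      have hcur1 : (full.drop j).take (j + 1 - j) = [l] := by
        rw [hgrow j (le_refl j)]; simp
      have := ih full j (j + 1) (by omega) hdrop'
      simp only [List.cons_append] at this
      rw [hcur1] at this
      rw [hslice, this]
      simp only [pvBlocksRec]; rw [if_pos h1]
    · by_cases h2 : PySem.Str.isIn "</Tracefile>" l = true
      · have hcuts : pvCutsFrom j (l :: ls) = ((j : Int) + 1) :: pvCutsFrom (j + 1) ls := by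
          simp only [pvCutsFrom]; rw [if_neg h1, if_pos h2]; exact List.singleton_append
        have hcast : (j : Int) + 1 = ((j + 1 : Nat) : Int) := by push_cast; ring
        rw [hcuts, hcast]; simp only [List.cons_append]; rw [pvSegsOf_cons]
        have hslice : PySem.List.slice full (some (c : Int)) (some ((j + 1 : Nat) : Int))
            = (full.drop c).take (j - c) ++ [l] := by
          rw [PySem.List.slice_natCast, hgrow c hcj]
        have hcur1 : (full.drop (j + 1)).take ((j + 1) - (j + 1)) = [] := by simp
        have := ih full (j + 1) (j + 1) (le_refl _) hdrop'
        simp only [List.cons_append] at this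
        rw [hcur1] at this
        rw [hslice, this]
        simp only [pvBlocksRec]; rw [if_neg h1, if_pos h2]
      · have hcuts : pvCutsFrom j (l :: ls) = pvCutsFrom (j + 1) ls := by
          simp only [pvCutsFrom]; rw [if_neg h1, if_neg h2]; rfl
        rw [hcuts]
        have := ih full c (j + 1) (by omega) hdrop'
        rw [hgrow c hcj] at this
        rw [this]
        simp only [pvBlocksRec]; rw [if_neg h1, if_neg h2]

-- ===== VERDICT (by name: the statement is the Claim_ definition above) =====
theorem parse_blocks_spec : Claim_equal_parse_blocks := by
  intro text _
  unfold Spec_parse_blocks parse_blocks parse_blocks_alt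
  have hB :
      ((((PySem.List.enumerate (PySem.Str.splitlines text) 0).foldl
          (fun (acc : List Int) (p : Int × String) =>
            if PySem.Str.startswith p.2 "-1\tNULL\tCTG" then acc ++ [p.1]
            else if PySem.Str.isIn "</Tracefile>" p.2 then acc ++ [p.1 + 1]
            else acc) [(0 : Int)]) ++ [((PySem.Str.splitlines text).length : Int)])) =
      (((0 : Nat) : Int) :: pvCutsFrom 0 (PySem.Str.splitlines text))
        ++ [((PySem.Str.splitlines text).length : Int)] := by
    have h0 : ((0 : Nat) : Int) = (0 : Int) := by norm_num
    rw [← h0] at *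
    rw [pvFoldCuts (PySem.Str.splitlines text) 0 [((0 : Nat) : Int)]]
    simp
  simp only [hB]
  have hsegs := pvSegs_eq (PySem.Str.splitlines text) (PySem.Str.splitlines text) 0 0
    (le_refl 0) (by simp)
  simp only [List.drop_zero] at hsegs
  show _ = ((pvSegsOf (PySem.Str.splitlines text) _).filter pvBlockValid).map _
  rw [hsegs]
  have := pvLoopA (PySem.Str.splitlines text) [] [] [] (by simp)
  simpa using this
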